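-- pv_equiv track=rewrite | github.com/ccurtis7/GameJam2023 | MLStrategy.py | whichReroll2
-- ===== SOURCE A (Python) =====
-- def takingStock(values):
--     counts = [0]*7
--     locs = [0]*7
--     for i, value in enumerate(values):
--         counts[value] += 1
--         if locs[value] == 0:
--             locs[value] = [i]
--         else:
--             locs[value] = locs[value] + [i]
--     return counts, locs
--
-- def whichReroll2(selection, values):
--
--     values = values.copy()
--     counts, locs = takingStock(values)
--     ordered = []
--     if len(selection) == 0:
--         return []
--     else:
--         down = [5, 0, -1]
--         for j in range(*down):
--             idx = 0
--             count = 0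
--             for i in range(counts.count(j)):
--                 if count == 0:
--                     idx = counts.index(j)
--                 else:
--                     idx = counts.index(j, idx+1)
--                 ordered = ordered + j*[idx]
--                 count += 1
--
--         reroll = []
--         for i in selection:
--             idx = values.index(ordered[i])
--             values[idx] = '.'
--             reroll.append(idx)
--
--     return reroll
-- ===== SOURCE B (Python) =====
-- def whichReroll2(selection, values):
--     values = list(values)
--     counts = {}
--     for v in values:
--         counts[v] = counts.get(v, 0) + 1
--     if not selection:
--         return []
--     ordered = []
--     for f in sorted(counts, key=lambda f: (-counts[f], f)):
--         if 1 <= counts[f] <= 5: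
--             ordered.extend([f] * counts[f])
--     reroll = []
--     for i in selection:
--         idx = values.index(ordered[i])
--         values[idx] = '.'
--         reroll.append(idx)
--     return reroll
-- ===== Notes on version B (the rewrite author's own statement) =====
-- stated objective: simpler
-- what changed: The level-by-level ordered construction (outer loop over count levels 5..1 with repeated counts.count/counts.index scans over a fixed 7-slot array) is replaced by counting faces in a dict and sorting the faces once by (-count, face); the final masking reroll loop is kept.
-- outside the precondition, e.g. on whichReroll2([0], [-1, 6]): A returns [1], B returns [0]
import Mathlib
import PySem

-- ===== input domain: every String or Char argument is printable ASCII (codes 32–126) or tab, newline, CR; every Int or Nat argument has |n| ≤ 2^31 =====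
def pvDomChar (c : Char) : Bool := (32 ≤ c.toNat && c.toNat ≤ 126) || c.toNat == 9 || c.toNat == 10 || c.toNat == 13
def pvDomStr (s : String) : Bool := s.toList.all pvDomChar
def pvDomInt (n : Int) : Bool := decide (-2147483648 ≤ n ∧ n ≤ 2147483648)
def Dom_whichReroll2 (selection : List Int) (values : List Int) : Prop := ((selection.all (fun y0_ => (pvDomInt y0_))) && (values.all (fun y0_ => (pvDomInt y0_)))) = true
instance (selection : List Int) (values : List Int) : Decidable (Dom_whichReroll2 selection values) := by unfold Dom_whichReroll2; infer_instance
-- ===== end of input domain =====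

-- B replaces A's level-by-level `ordered` construction (repeated counts.count/counts.index
-- scans for each count level 5..1) by counting faces in a dict and sorting the faces once by
-- (-count, face); objective: simpler. The reroll/masking loop is unchanged.

-- ===== PORT A =====

-- takingStock: counts[value] += 1 / locs[value] updates.  Python's locs entries start as the
-- int 0 and become lists; since locs is never read by whichReroll2, the 0-sentinel is ported
-- as the empty list [].  Out-of-range counts[value] raises IndexError in Python (excluded by
-- Pre_); PySem.List.pySetD leaves the list unchanged there.
def tsStep (st : List Int × List (List Int)) (p : Int × Int) : List Int × List (List Int) :=
  let counts := PySem.List.pySetD st.1 p.2 (PySem.List.pyGetD st.1 p.2 0 + 1)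
  let cur := PySem.List.pyGetD st.2 p.2 []
  let locs := if cur = [] then PySem.List.pySetD st.2 p.2 [p.1]
              else PySem.List.pySetD st.2 p.2 (cur ++ [p.1])
  (counts, locs)

def takingStock (values : List Int) : List Int × List (List Int) :=
  (PySem.List.enumerate values 0).foldl tsStep
    ([0, 0, 0, 0, 0, 0, 0], [[], [], [], [], [], [], []])

-- inner loop 'for i in range(counts.count(j))' of A; state (idx, count, ordered).
-- counts.index(j) / counts.index(j, idx+1): the scan always finds an occurrence (the loop runs
-- counts.count(j) times), so the .getD 0 on index? is never taken.
def aInner (counts : List Int) (j : Int) (ordered : List Int) : List Int :=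
  ((PySem.List.pyRange 0 ((PySem.List.count counts j : Nat) : Int) 1).foldl
    (fun (st : Int × Int × List Int) _ =>
      let idx' : Int :=
        if st.2.1 = 0 then ((PySem.List.index? counts j).getD 0 : Nat)
        else ((((PySem.List.index? (counts.drop (st.1 + 1).toNat) j).map
                  (· + (st.1 + 1).toNat)).getD 0 : Nat))
      (idx', st.2.1 + 1, st.2.2 ++ List.replicate j.toNat idx'))
    (0, 0, ordered)).2.2

-- 'for j in range(5, 0, -1)' building ordered
def aOrdered (counts : List Int) : List Int :=
  (PySem.List.pyRange 5 0 (-1)).foldl (fun ord j => aInner counts j ord) []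

def whichReroll2 (selection : List Int) (values : List Int) : List Int :=
  let values' := values                      -- values = values.copy()
  let counts := (takingStock values').1
  if selection.length = 0 then []
  else
    let ordered := aOrdered counts
    -- reroll loop; values[idx] = '.' is ported as setting the entry to none
    -- (ordered[i] IndexError / values.index ValueError are excluded by Pre_)
    (selection.foldl (fun (st : List (Option Int) × List Int) i =>
        let face := PySem.List.pyGetD ordered i 0
        let idx := (PySem.List.index? st.1 (some face)).getD 0
        (st.1.set idx none, st.2 ++ [(idx : Int)]))
      (values'.map some, [])).2

-- ===== PORT B =====

-- counts[v] = counts.get(v, 0) + 1 is Dict.modify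
def bCounts (values : List Int) : PySem.Dict Int Int :=
  values.foldl (fun d v => d.modify v 0 (· + 1)) PySem.Dict.empty

-- for f in sorted(counts, key=lambda f: (-counts[f], f)): if 1 <= counts[f] <= 5: ordered.extend([f]*counts[f])
def bOrdered (counts : PySem.Dict Int Int) : List Int :=
  (PySem.List.sorted2 counts.keys (fun f => -(counts.getD f 0)) (fun f => f)).foldl
    (fun ord f =>
      if 1 ≤ counts.getD f 0 ∧ counts.getD f 0 ≤ 5 then
        ord ++ List.replicate (counts.getD f 0).toNat f
      else ord) []

def whichReroll2_alt (selection : List Int) (values : List Int) : List Int :=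
  let values' := values                      -- values = list(values)
  let counts := bCounts values'
  if selection = [] then []
  else
    let ordered := bOrdered counts
    (selection.foldl (fun (st : List (Option Int) × List Int) i =>
        let face := PySem.List.pyGetD ordered i 0
        let idx := (PySem.List.index? st.1 (some face)).getD 0
        (st.1.set idx none, st.2 ++ [(idx : Int)]))
      (values'.map some, [])).2

-- ===== PRECONDITION & SPEC =====

-- the count of face f in values, as an Int
def cnt (values : List Int) (f : Int) : Int := (values.count f : Int)

-- length of the `ordered` list: each face with 1..5 occurrences contributes its count
def orderedLen (values : List Int) : Int :=
  (([0, 1, 2, 3, 4, 5, 6] : List Int).map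
    (fun f => if 1 ≤ cnt values f ∧ cnt values f ≤ 5 then cnt values f else 0)).sum

-- position in `ordered` where face f's block starts (faces ordered by count desc, face asc)
def blockStart (values : List Int) (f : Int) : Int :=
  (([0, 1, 2, 3, 4, 5, 6] : List Int).map (fun g =>
     if (1 ≤ cnt values g ∧ cnt values g ≤ 5) ∧
        (cnt values f < cnt values g ∨ (cnt values g = cnt values f ∧ g < f))
     then cnt values g else 0)).sum

-- Pre_ restricts to the natural domain (die faces 0..6; with an empty selection any faces in
-- [-7,6] that takingStock accepts), to in-range selection positions, and to selections that do
-- not pick more slots of one face's block than that face has dice: outside it A raises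
-- (IndexError/ValueError) or returns only through the accidental negative-index wraparound of
-- counts[value], where B's dict keyed by the actual value is the natural reading.
def Pre_whichReroll2 (selection : List Int) (values : List Int) : Prop :=
  (selection = [] ∧ ∀ v ∈ values, -7 ≤ v ∧ v ≤ 6) ∨
  (selection ≠ [] ∧ (∀ v ∈ values, 0 ≤ v ∧ v ≤ 6) ∧
    (∀ i ∈ selection, -(orderedLen values) ≤ i ∧ i < orderedLen values) ∧
    (∀ f ∈ ([0, 1, 2, 3, 4, 5, 6] : List Int), 1 ≤ cnt values f → cnt values f ≤ 5 →
      ((selection.countP (fun i => decide (blockStart values f ≤ i % orderedLen values ∧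
          i % orderedLen values < blockStart values f + cnt values f)) : Nat) : Int)
        ≤ cnt values f))

instance (selection : List Int) (values : List Int) : Decidable (Pre_whichReroll2 selection values) := by
  unfold Pre_whichReroll2; infer_instance

def pvWitness_whichReroll2 : List Int × List Int := ([0, 1], [3, 3, 4])

def Spec_whichReroll2 (selection : List Int) (values : List Int) (out : List Int) : Prop := out = whichReroll2_alt selection values
instance (selection : List Int) (values : List Int) (out : List Int) : Decidable (Spec_whichReroll2 selection values out) := by unfold Spec_whichReroll2; infer_instance

-- ===== CLAIM (what is proved, stated in full; the proofs are below) =====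
def Claim_equal_whichReroll2 : Prop := ∀ (selection : List Int) (values : List Int), Dom_whichReroll2 selection values → Pre_whichReroll2 selection values → Spec_whichReroll2 selection values (whichReroll2 selection values)

-- ===== LEMMAS AND PROOFS =====

-- counts[f] for the 7-slot counts array, by literal face
def sel7 (c0 c1 c2 c3 c4 c5 c6 : Int) (f : Int) : Int :=
  if f = 0 then c0 else if f = 1 then c1 else if f = 2 then c2 else if f = 3 then c3
  else if f = 4 then c4 else if f = 5 then c5 else c6

-- one count level of the canonical ordered list: the faces with exactly j occurrences
def faceL (values : List Int) (j : Int) : List Int :=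
  ([0, 1, 2, 3, 4, 5, 6] : List Int).filter (fun f => cnt values f == j)

-- faces with count j, each repeated j times
def levelL (values : List Int) (j : Int) : List Int :=
  (faceL values j).flatMap (fun f => List.replicate j.toNat f)

lemma beq_int_decide (x y : Int) : (x == y) = decide (x = y) := rfl

lemma sorted2_eq_sorted_lex {α : Type} (xs : List α) (k1 k2 : α → Int) :
    PySem.List.sorted2 xs k1 k2 = PySem.List.sorted xs (fun a => toLex (k1 a, k2 a)) := by
  unfold PySem.List.sorted2 PySem.List.sorted
  simp only []
  congr 1
  funext acc x
  congr 1
  funext a b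
  have : (toLex (k1 a, k2 a) < toLex (k1 b, k2 b)) ↔
      (k1 a < k1 b ∨ (k1 a = k1 b ∧ k2 a < k2 b)) := Prod.Lex.toLex_lt_toLex
  by_cases h1 : k1 a < k1 b <;> by_cases h2 : k1 b < k1 a <;> by_cases h3 : k2 a < k2 b <;>
    simp [h1, h2, h3, this] <;> omega

-- the takingStock fold only increments the slot of each (in-range) value
lemma tsCounts (ps : List (Int × Int)) (h : ∀ p ∈ ps, 0 ≤ p.2 ∧ p.2 ≤ 6) :
    ∀ (ls : List (List Int)) (a0 a1 a2 a3 a4 a5 a6 : Int),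
    (ps.foldl tsStep ([a0,a1,a2,a3,a4,a5,a6], ls)).1 =
      [a0 + ((ps.map Prod.snd).count 0 : Int), a1 + ((ps.map Prod.snd).count 1 : Int),
       a2 + ((ps.map Prod.snd).count 2 : Int), a3 + ((ps.map Prod.snd).count 3 : Int),
       a4 + ((ps.map Prod.snd).count 4 : Int), a5 + ((ps.map Prod.snd).count 5 : Int),
       a6 + ((ps.map Prod.snd).count 6 : Int)] := by
  induction ps with
  | nil => simp
  | cons p ps ih =>
    intro ls a0 a1 a2 a3 a4 a5 a6
    have hv := (h p (by simp)).1
    have hv' := (h p (by simp)).2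
    have hps : ∀ q ∈ ps, 0 ≤ q.2 ∧ q.2 ≤ 6 := fun q hq => h q (by simp [hq])
    obtain ⟨i, v⟩ := p
    simp only at hv hv'
    interval_cases v <;>
      · simp only [List.foldl_cons, tsStep]
        norm_num [PySem.List.pySetD, PySem.List.pySet?, PySem.List.pyIdx?,
          PySem.List.pyGetD, PySem.List.pyGet?, Int.toNat]
        rw [ih hps]
        simp
        omega

lemma takingStock_counts (values : List Int) (h : ∀ v ∈ values, 0 ≤ v ∧ v ≤ 6) :
    (takingStock values).1 =
      [cnt values 0, cnt values 1, cnt values 2, cnt values 3,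
       cnt values 4, cnt values 5, cnt values 6] := by
  have hps : ∀ p ∈ PySem.List.enumerate values 0, 0 ≤ p.2 ∧ p.2 ≤ 6 := by
    intro p hp
    refine h p.2 ?_
    have hm : p.2 ∈ (PySem.List.enumerate values 0).map Prod.snd :=
      List.mem_map_of_mem hp
    rwa [show ((PySem.List.enumerate values 0).map Prod.snd) = values from
      PySem.List.map_snd_enumerate values 0] at hm
  unfold takingStock
  rw [tsCounts _ hps]
  simp [cnt, PySem.List.map_snd_enumerate]

-- one level of A's ordered loop: the index scan finds the positions of count level j
-- in ascending order, each repeated j times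
set_option maxHeartbeats 4000000 in
lemma levelA (c0 c1 c2 c3 c4 c5 c6 j : Int) (acc : List Int) :
    aInner [c0, c1, c2, c3, c4, c5, c6] j acc =
      acc ++ (([0, 1, 2, 3, 4, 5, 6] : List Int).filter
                (fun f => sel7 c0 c1 c2 c3 c4 c5 c6 f == j)).flatMap
              (fun f => List.replicate j.toNat f) := by
  by_cases h0 : c0 = j <;> by_cases h1 : c1 = j <;> by_cases h2 : c2 = j <;>
    by_cases h3 : c3 = j <;> by_cases h4 : c4 = j <;> by_cases h5 : c5 = j <;>
    by_cases h6 : c6 = j <;>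
  simp [aInner, sel7, beq_int_decide, PySem.List.count_eq, h0, h1, h2, h3, h4, h5, h6,
    PySem.List.pyRange, PySem.List.index?, List.idxOf?, List.findIdx?, List.findIdx?.go,
    Int.toNat, List.filter, List.flatMap, List.range_succ]

lemma aOrdered_eq (values : List Int) (h : ∀ v ∈ values, 0 ≤ v ∧ v ≤ 6) :
    aOrdered (takingStock values).1 =
      levelL values 5 ++ levelL values 4 ++ levelL values 3 ++ levelL values 2 ++ levelL values 1 := by
  rw [takingStock_counts values h]
  unfold aOrdered
  rw [show PySem.List.pyRange 5 0 (-1) = [5, 4, 3, 2, 1] from by decide]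
  simp only [List.foldl_cons, List.foldl_nil]
  simp only [levelA]
  have hfc : ∀ j : Int,
      (([0, 1, 2, 3, 4, 5, 6] : List Int).filter
        (fun f => sel7 (cnt values 0) (cnt values 1) (cnt values 2) (cnt values 3)
          (cnt values 4) (cnt values 5) (cnt values 6) f == j))
      = ([0, 1, 2, 3, 4, 5, 6] : List Int).filter (fun f => cnt values f == j) := by
    intro j
    refine List.filter_congr (fun f hf => ?_)
    fin_cases hf <;> rfl
  simp only [hfc, List.nil_append]
  rfl

lemma mem_faceL (values : List Int) (j f : Int) :
    f ∈ faceL values j ↔ f ∈ ([0, 1, 2, 3, 4, 5, 6] : List Int) ∧ cnt values f = j := by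
  simp [faceL, List.mem_filter]

-- the canonical face order is strictly increasing under the (-count, face) lex key
lemma pairwise_faceT (values : List Int) :
    (faceL values 5 ++ faceL values 4 ++ faceL values 3 ++ faceL values 2 ++ faceL values 1).Pairwise
      (fun a b => (toLex (-(cnt values a), a) : Int ×ₗ Int) < toLex (-(cnt values b), b)) := by
  have hpw : ∀ j : Int, (faceL values j).Pairwise
      (fun a b => (toLex (-(cnt values a), a) : Int ×ₗ Int) < toLex (-(cnt values b), b)) := by
    intro j
    have base : (faceL values j).Pairwise (· < ·) :=
      List.Pairwise.sublist List.filter_sublist (by decide)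
    refine base.imp_of_mem (fun {a b} ha hb hab => ?_)
    have hca := ((mem_faceL values j a).1 ha).2
    have hcb := ((mem_faceL values j b).1 hb).2
    rw [Prod.Lex.toLex_lt_toLex]
    right
    exact ⟨by rw [hca, hcb], hab⟩
  have cross : ∀ j j' : Int, j' < j → ∀ a ∈ faceL values j, ∀ b ∈ faceL values j',
      (toLex (-(cnt values a), a) : Int ×ₗ Int) < toLex (-(cnt values b), b) := by
    intro j j' hj a ha b hb
    have hca := ((mem_faceL values j a).1 ha).2
    have hcb := ((mem_faceL values j' b).1 hb).2
    rw [Prod.Lex.toLex_lt_toLex]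
    left
    rw [hca, hcb]
    omega
  rw [List.pairwise_append]
  refine ⟨?_, hpw 1, ?_⟩
  · rw [List.pairwise_append]
    refine ⟨?_, hpw 2, ?_⟩
    · rw [List.pairwise_append]
      refine ⟨?_, hpw 3, ?_⟩
      · rw [List.pairwise_append]
        refine ⟨hpw 5, hpw 4, cross 5 4 (by omega)⟩
      · intro a ha b hb
        rcases List.mem_append.1 ha with h | h
        exacts [cross 5 3 (by omega) a h b hb, cross 4 3 (by omega) a h b hb]
    · intro a ha b hb
      rcases List.mem_append.1 ha with h | h
      · rcases List.mem_append.1 h with h' | h'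
        exacts [cross 5 2 (by omega) a h' b hb, cross 4 2 (by omega) a h' b hb]
      · exact cross 3 2 (by omega) a h b hb
  · intro a ha b hb
    rcases List.mem_append.1 ha with h | h
    · rcases List.mem_append.1 h with h' | h'
      · rcases List.mem_append.1 h' with h'' | h''
        exacts [cross 5 1 (by omega) a h'' b hb, cross 4 1 (by omega) a h'' b hb]
      · exact cross 3 1 (by omega) a h' b hb
    · exact cross 2 1 (by omega) a h b hb

lemma bOrdered_eq (values : List Int) (h : ∀ v ∈ values, 0 ≤ v ∧ v ≤ 6) :
    bOrdered (bCounts values) =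
      levelL values 5 ++ levelL values 4 ++ levelL values 3 ++ levelL values 2 ++ levelL values 1 := by
  have hb : bCounts values = PySem.Dict.counter values :=
    (PySem.Dict.counter_eq_foldl values).symm
  rw [bOrdered, hb, PySem.Dict.keys_counter]
  simp only [PySem.Dict.getD_counter]
  have hc : ∀ f : Int, ((values.count f : Nat) : Int) = cnt values f := fun _ => rfl
  simp only [hc]
  rw [sorted2_eq_sorted_lex]
  rw [PySem.List.foldl_ite_eq_foldl_filter
    (p := fun f => 1 ≤ cnt values f ∧ cnt values f ≤ 5)
    (f := fun acc f => acc ++ List.replicate (cnt values f).toNat f)]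
  rw [PySem.List.foldl_append_eq_flatMap]
  -- the filtered sorted keys are exactly the faces, level by level
  have hF : (PySem.List.sorted (PySem.Set.ofList values)
        (fun f => (toLex (-(cnt values f), f) : Int ×ₗ Int))).filter
          (fun f => decide (1 ≤ cnt values f ∧ cnt values f ≤ 5))
      = faceL values 5 ++ faceL values 4 ++ faceL values 3 ++ faceL values 2 ++ faceL values 1 := by
    have hpwT := pairwise_faceT values
    have hndT : (faceL values 5 ++ faceL values 4 ++ faceL values 3 ++ faceL values 2 ++
        faceL values 1).Nodup :=
      hpwT.imp (fun {a b} hab => by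
        intro he; subst he; exact lt_irrefl _ hab)
    have hndF : ((PySem.List.sorted (PySem.Set.ofList values)
        (fun f => (toLex (-(cnt values f), f) : Int ×ₗ Int))).filter
          (fun f => decide (1 ≤ cnt values f ∧ cnt values f ≤ 5))).Nodup :=
      List.Nodup.filter _ ((PySem.List.sorted_perm _ _ _).nodup_iff.2 (PySem.Set.nodup_ofList values))
    have hperm : ((PySem.List.sorted (PySem.Set.ofList values)
        (fun f => (toLex (-(cnt values f), f) : Int ×ₗ Int))).filter
          (fun f => decide (1 ≤ cnt values f ∧ cnt values f ≤ 5))).Perm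
        (faceL values 5 ++ faceL values 4 ++ faceL values 3 ++ faceL values 2 ++ faceL values 1) := by
      rw [List.perm_ext_iff_of_nodup hndF hndT]
      intro x
      have hsp := (PySem.List.sorted_perm (PySem.Set.ofList values)
        (fun f => (toLex (-(cnt values f), f) : Int ×ₗ Int)) false)
      constructor
      · intro hx
        have hx' := List.mem_filter.1 hx
        have hxv : x ∈ values := (PySem.Set.mem_ofList values x).1 (hsp.mem_iff.1 hx'.1)
        have hbounds := h x hxv
        have hcx : 1 ≤ cnt values x ∧ cnt values x ≤ 5 := of_decide_eq_true hx'.2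
        have hxf : x ∈ ([0, 1, 2, 3, 4, 5, 6] : List Int) := by
          simp only [List.mem_cons, List.not_mem_nil, or_false]
          omega
        simp only [List.mem_append, mem_faceL]
        have : cnt values x = 5 ∨ cnt values x = 4 ∨ cnt values x = 3 ∨
            cnt values x = 2 ∨ cnt values x = 1 := by omega
        rcases this with h5 | h4 | h3 | h2 | h1
        · exact Or.inl (Or.inl (Or.inl (Or.inl ⟨hxf, h5⟩)))
        · exact Or.inl (Or.inl (Or.inl (Or.inr ⟨hxf, h4⟩)))
        · exact Or.inl (Or.inl (Or.inr ⟨hxf, h3⟩))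
        · exact Or.inl (Or.inr ⟨hxf, h2⟩)
        · exact Or.inr ⟨hxf, h1⟩
      · intro hx
        simp only [List.mem_append, mem_faceL] at hx
        have hcx : 1 ≤ cnt values x ∧ cnt values x ≤ 5 := by
          rcases hx with ((((⟨_, h'⟩ | ⟨_, h'⟩) | ⟨_, h'⟩) | ⟨_, h'⟩) | ⟨_, h'⟩) <;> omega
        have hxv : x ∈ values := by
          have : 0 < values.count x := by
            have := hcx.1; unfold cnt at this; omega
          exact List.count_pos_iff.1 this
        refine List.mem_filter.2 ⟨hsp.mem_iff.2 ((PySem.Set.mem_ofList values x).2 hxv), ?_⟩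
        exact decide_eq_true hcx
    refine List.Perm.eq_of_pairwise (le := fun a b =>
        (toLex (-(cnt values a), a) : Int ×ₗ Int) ≤ toLex (-(cnt values b), b)) ?_ ?_ ?_ hperm
    · intro a b _ _ hab hba
      have := le_antisymm hab hba
      have h2 := congrArg (fun p => (ofLex p).2) this
      simpa using h2
    · exact List.Pairwise.sublist List.filter_sublist
        (PySem.List.sorted_pairwise (PySem.Set.ofList values) _)
    · exact hpwT.imp (fun {a b} hab => le_of_lt hab)
  rw [hF]
  simp only [List.nil_append, List.flatMap_append]
  have hlev : ∀ j : Int, (faceL values j).flatMap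
      (fun f => List.replicate (cnt values f).toNat f) = levelL values j := by
    intro j
    unfold levelL faceL
    refine List.flatMap_congr (fun f hf => ?_)
    have := (List.mem_filter.1 hf).2
    have hcj : cnt values f = j := by simpa using this
    rw [hcj]
  rw [hlev 5, hlev 4, hlev 3, hlev 2, hlev 1]

lemma ordered_eq (values : List Int) (h : ∀ v ∈ values, 0 ≤ v ∧ v ≤ 6) :
    aOrdered (takingStock values).1 = bOrdered (bCounts values) := by
  rw [aOrdered_eq values h, bOrdered_eq values h]

-- ===== VERDICT (by name: the statement is the Claim_ definition above) =====
theorem whichReroll2_spec : Claim_equal_whichReroll2 := by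
  intro selection values _hdom hpre
  unfold Spec_whichReroll2 whichReroll2 whichReroll2_alt
  rcases hpre with ⟨hsel, _⟩ | ⟨hne, hrange, _, _⟩
  · simp [hsel]
  · simp only []
    rw [if_neg (by simpa using hne), if_neg hne, ordered_eq values hrange]
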